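-- pv_equiv track=rewrite | github.com/oaker-io/wewrite | scripts/workflow/revise.py | _excerpt
-- ===== SOURCE A (Python) =====
-- def _excerpt(md: str) -> tuple[str, str]:
--     """提取首段 + 末段(跳过 H1/图/容器/引用等非正文)。"""
--     lines = md.splitlines()
--     first, last = "", ""
--     for l in lines:
--         if l and not l.startswith(("#", "!", "<", ":", "-", ">", "|")):
--             first = l
--             break
--     for l in reversed(lines):
--         if l and not l.startswith(("#", "!", "<", ":", "-", ">", "|")):
--             last = l
--             break
--     return first, last
-- ===== SOURCE B (Python) =====
-- def _excerpt(md: str) -> tuple[str, str]: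
--     lines = md.splitlines()
--     matches = [l for l in lines if l and l[0] not in "#!<:->|"]
--     return (matches[0], matches[-1]) if matches else ("", "")
-- ===== Notes on version B (the rewrite author's own statement) =====
-- stated objective: simpler
-- what changed: Replaces A's two separate early-exit scans (forward loop and reversed loop, each with the 7-prefix startswith test) by one comprehension filtering the qualifying body lines via a first-character membership test, then returns the list's endpoints (or ('','') if empty).
import Mathlib
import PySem

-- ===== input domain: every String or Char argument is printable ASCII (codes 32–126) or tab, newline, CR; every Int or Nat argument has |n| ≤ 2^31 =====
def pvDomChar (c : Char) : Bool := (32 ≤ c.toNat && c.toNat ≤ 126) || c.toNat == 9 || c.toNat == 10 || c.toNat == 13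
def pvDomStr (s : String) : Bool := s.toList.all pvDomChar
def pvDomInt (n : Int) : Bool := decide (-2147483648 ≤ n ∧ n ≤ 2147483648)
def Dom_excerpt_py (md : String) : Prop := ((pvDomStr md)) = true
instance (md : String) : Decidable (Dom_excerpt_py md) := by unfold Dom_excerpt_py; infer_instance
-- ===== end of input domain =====

-- B replaces A's two separate early-exit scans (forward and reversed) by one filtered
-- list of qualifying lines and reads off its endpoints (objective: simpler).

-- ===== PORT A =====
-- 'l and not l.startswith(("#","!","<",":","-",">","|"))'
def pvKeepA (l : String) : Bool :=
  (l != "") && !(PySem.Str.startswith l "#" || PySem.Str.startswith l "!" ||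
                 PySem.Str.startswith l "<" || PySem.Str.startswith l ":" ||
                 PySem.Str.startswith l "-" || PySem.Str.startswith l ">" ||
                 PySem.Str.startswith l "|")

-- 'for l in lines: if …: first = l; break' starting from first = ""
def pvScanA : List String → String
  | [] => ""
  | l :: rest => if pvKeepA l then l else pvScanA rest

def excerpt_py (md : String) : String × String :=
  let lines := PySem.Str.splitlines md
  (pvScanA lines, pvScanA lines.reverse)

-- ===== PORT B =====
-- 'l and l[0] not in "#!<:->|"'
def pvKeepB (l : String) : Bool :=
  match l.toList with
  | [] => false
  | c :: _ => !(("#!<:->|".toList).contains c)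

def excerpt_py_alt (md : String) : String × String :=
  let ms := (PySem.Str.splitlines md).filter pvKeepB
  if ms.isEmpty then ("", "") else (ms.headD "", ms.getLastD "")

-- ===== PRECONDITION & SPEC =====
def Spec_excerpt_py (md : String) (out : String × String) : Prop := out = excerpt_py_alt md
instance (md : String) (out : String × String) : Decidable (Spec_excerpt_py md out) := by unfold Spec_excerpt_py; infer_instance

-- ===== CLAIM (what is proved, stated in full; the proofs are below) =====
def Claim_equal_excerpt_py : Prop := ∀ (md : String), Dom_excerpt_py md → Spec_excerpt_py md (excerpt_py md)

-- ===== LEMMAS AND PROOFS =====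

theorem pvKeep_eq (l : String) : pvKeepA l = pvKeepB l := by
  unfold pvKeepA pvKeepB
  simp only [PySem.Str.startswith_eq]
  cases h : l.toList with
  | nil =>
    have : l = "" := by simpa using h
    simp [this, PySem.Chars.startswith]
  | cons c t =>
    have hne : l ≠ "" := by intro e; rw [e] at h; simp at h
    rw [Bool.eq_iff_iff]
    simp [hne, PySem.Chars.startswith, List.isPrefixOf, bne_iff_ne, eq_comm (b := c)]
    tauto

theorem pvScanA_eq_headD (xs : List String) :
    pvScanA xs = (xs.filter pvKeepA).headD "" := by
  induction xs with
  | nil => rfl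
  | cons a t ih =>
    by_cases h : pvKeepA a = true
    · simp [pvScanA, h]
    · simp [pvScanA, h, ih]

theorem pvScanA_reverse (xs : List String) :
    pvScanA xs.reverse = (xs.filter pvKeepA).getLastD "" := by
  rw [pvScanA_eq_headD, List.filter_reverse]
  simp [List.head?_reverse, List.getLastD_eq_getLast?]

-- ===== VERDICT (by name: the statement is the Claim_ definition above) =====
theorem excerpt_py_spec : Claim_equal_excerpt_py := by
  intro md _
  unfold Spec_excerpt_py excerpt_py excerpt_py_alt
  have hk : pvKeepB = pvKeepA := funext fun l => (pvKeep_eq l).symm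
  rw [hk]
  simp only []
  rw [pvScanA_eq_headD, pvScanA_reverse]
  cases (PySem.Str.splitlines md).filter pvKeepA with
  | nil => simp
  | cons a t => simp
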